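-- pv_equiv track=rewrite | github.com/terrydlek/first-project | 코테 알고리즘 공부/숨어있는 숫자의 덧셈(2)(programmers).py | solution
-- ===== SOURCE A (Python) =====
-- def solution(my_string):
--     answer = 0
--     num = "0"
--     for i in my_string:
--         if i.isdigit():
--             num += i
--         else:
--             answer += int(num)
--             num = "0"
--     answer += int(num)
--     return answer
-- ===== SOURCE B (Python) =====
-- def solution(my_string):
--     masked = "".join(c if c.isdigit() else " " for c in my_string)
--     return sum(int(tok) for tok in masked.split())
-- ===== Notes on version B (the rewrite author's own statement) =====
-- stated objective: idiomatic
-- what changed: Replaces the explicit accumulate-and-reset string state machine with a mask-non-digits-to-spaces pass followed by str.split() and a sum of int() over the resulting maximal digit runs.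
import Mathlib
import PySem

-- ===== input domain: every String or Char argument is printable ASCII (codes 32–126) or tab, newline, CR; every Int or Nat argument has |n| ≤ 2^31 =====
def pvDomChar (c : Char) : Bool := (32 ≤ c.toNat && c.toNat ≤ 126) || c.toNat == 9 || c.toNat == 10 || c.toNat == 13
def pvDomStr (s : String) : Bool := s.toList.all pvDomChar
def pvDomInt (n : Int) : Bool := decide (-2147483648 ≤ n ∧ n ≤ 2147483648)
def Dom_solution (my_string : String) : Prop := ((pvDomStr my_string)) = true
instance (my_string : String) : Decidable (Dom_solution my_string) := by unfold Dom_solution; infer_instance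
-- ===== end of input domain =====

-- B replaces A's accumulate-and-reset state machine by masking non-digits to spaces, splitting, and summing (idiomatic; same cost).

-- ===== PORT A =====
-- one loop step: if i.isdigit(): num += i  else: answer += int(num); num = "0"
-- int(num) is ported as (ofChars? num).getD 0; num is always "0" followed by digits, so
-- ofChars? is always `some` there and the default 0 is unreachable (int(num) never raises).
def solStep (st : Int × List Char) (i : Char) : Int × List Char :=
  if PySem.Chars.isdigit i = true then (st.1, st.2 ++ [i])
  else (st.1 + (PySem.Int.ofChars? st.2).getD 0, ['0'])

def solution (my_string : String) : Int :=
  let st := my_string.toList.foldl solStep (0, ['0'])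
  st.1 + (PySem.Int.ofChars? st.2).getD 0

-- ===== PORT B =====
-- masked = "".join(c if c.isdigit() else " " for c in my_string)
-- return sum(int(tok) for tok in masked.split())
-- int(tok) is ported as (ofChars? tok).getD 0; every token of masked.split() is a nonempty
-- digit run, so ofChars? is always `some` there and the default 0 is unreachable.
def solution_alt (my_string : String) : Int :=
  let masked := my_string.toList.map (fun c => if PySem.Chars.isdigit c = true then c else ' ')
  (PySem.Chars.split₀ masked).foldl (fun acc tok => acc + (PySem.Int.ofChars? tok).getD 0) 0

-- ===== PRECONDITION & SPEC =====
def Spec_solution (my_string : String) (out : Int) : Prop := out = solution_alt my_string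
instance (my_string : String) (out : Int) : Decidable (Spec_solution my_string out) := by unfold Spec_solution; infer_instance

-- ===== CLAIM (what is proved, stated in full; the proofs are below) =====
def Claim_equal_solution : Prop := ∀ (my_string : String), Dom_solution my_string → Spec_solution my_string (solution my_string)

-- ===== LEMMAS AND PROOFS =====

-- digits are not int()-whitespace, so the strip inside ofChars? is the identity on digit runs
theorem dw_digits (l : List Char) (hl : ∀ c ∈ l, PySem.Chars.isdigit c = true) :
      List.dropWhile PySem.Int.isIntSpace l = l := by
  rw [List.dropWhile_eq_self_iff]
  intro hne
  match l, hne with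
  | c :: l, _ =>
    have h1 := hl c (by simp)
    revert h1
    simp [PySem.Chars.isdigit, PySem.Int.isIntSpace]
    intro h1 h2
    refine ⟨⟨⟨⟨⟨?_, ?_⟩, ?_⟩, ?_⟩, ?_⟩, ?_⟩ <;>
      (rintro rfl; exact absurd h1 (by decide))

-- int("0" + run) = int(run) for a nonempty digit run
theorem ofChars_cons_zero (c : Char) (cs : List Char) (hc : PySem.Chars.isdigit c = true)
    (h : ∀ x ∈ cs, PySem.Chars.isdigit x = true) :
    PySem.Int.ofChars? ('0'::c::cs) = PySem.Int.ofChars? (c::cs) := by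
  unfold PySem.Int.ofChars?
  have hd : ∀ x ∈ ('0'::c::cs), PySem.Chars.isdigit x = true := by
    intro x hx; rcases hx with _|⟨_,hx⟩; · decide
    rcases hx with _|⟨_,hx⟩; · exact hc
    exact h _ hx
  have hd2 : ∀ x ∈ (c::cs), PySem.Chars.isdigit x = true := by
    intro x hx; rcases hx with _|⟨_,hx⟩; · exact hc
    exact h _ hx
  rw [dw_digits _ hd, dw_digits _ hd2, dw_digits, dw_digits]
  · simp only [List.reverse_reverse]
    have : c = '0' ∨ c = '1' ∨ c = '2' ∨ c = '3' ∨ c = '4' ∨ c = '5' ∨ c = '6' ∨ c = '7' ∨ c = '8' ∨ c = '9' := by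
      revert hc
      simp [PySem.Chars.isdigit, Char.le_def, UInt32.le_iff_toNat_le]
      intro h1 h2
      have hv : c.toNat = 48 ∨ c.toNat = 49 ∨ c.toNat = 50 ∨ c.toNat = 51 ∨ c.toNat = 52 ∨ c.toNat = 53 ∨ c.toNat = 54 ∨ c.toNat = 55 ∨ c.toNat = 56 ∨ c.toNat = 57 := by
        omega
      rcases hv with hv|hv|hv|hv|hv|hv|hv|hv|hv|hv <;>
        [left; (right;left); (right;right;left); (right;right;right;left);
         (right;right;right;right;left); (right;right;right;right;right;left);
         (right;right;right;right;right;right;left); (right;right;right;right;right;right;right;left);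
         (right;right;right;right;right;right;right;right;left); (right;right;right;right;right;right;right;right;right)] <;>
        · apply Char.ext; apply UInt32.toNat_inj.mp; exact hv
    rcases this with rfl|rfl|rfl|rfl|rfl|rfl|rfl|rfl|rfl|rfl <;> rfl
  · intro x hx; rw [List.mem_reverse] at hx; exact hd2 _ hx
  · intro x hx; rw [List.mem_reverse] at hx; exact hd _ hx

theorem ofChars_zero : (PySem.Int.ofChars? ['0']).getD 0 = 0 := by decide

theorem digit_not_space (c : Char) (hc : PySem.Chars.isdigit c = true) :
    PySem.Chars.isspace c = false := by
  revert hc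
  simp [PySem.Chars.isdigit, PySem.Chars.isspace, Char.le_def, UInt32.le_iff_toNat_le]
  omega

-- A's loop over a digit run just appends the run to num
theorem foldl_digit_run (r : List Char) (hr : ∀ x ∈ r, PySem.Chars.isdigit x = true) :
    ∀ (t : List Char) (a : Int) (num : List Char),
      List.foldl solStep (a, num) (r ++ t) = List.foldl solStep (a, num ++ r) t := by
  induction r with
  | nil => intro t a num; simp
  | cons c r ih =>
    intro t a num
    have hc : PySem.Chars.isdigit c = true := hr c (by simp)
    simp only [List.cons_append, List.foldl_cons, solStep, hc, if_pos]
    rw [ih (fun x hx => hr x (by simp [hx])) t a (num ++ [c])]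
    simp

-- the accumulator of split₀.go factors out
theorem splitgo_acc (l : List Char) :
    ∀ (cur : List Char) (acc : List (List Char)),
      PySem.Chars.split₀.go l cur acc = acc.reverse ++ PySem.Chars.split₀.go l cur [] := by
  induction l with
  | nil =>
    intro cur acc
    by_cases h : cur.isEmpty = true <;> simp [PySem.Chars.split₀.go, h]
  | cons c l ih =>
    intro cur acc
    simp only [PySem.Chars.split₀.go]
    by_cases hs : PySem.Chars.isspace c = true
    · simp only [hs, if_true]
      by_cases h : cur.isEmpty = true
      · simp only [h, if_true]
        rw [ih [] acc]
      · rw [if_neg h, if_neg h, ih [] (cur.reverse :: acc), ih [] [cur.reverse]]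
        simp
    · rw [if_neg hs, if_neg hs, ih (c :: cur) acc]

-- split₀.go consumes a run of non-space characters into cur
theorem splitgo_nonspace (r : List Char) (hr : ∀ x ∈ r, PySem.Chars.isspace x = false) :
    ∀ (t : List Char) (cur : List Char) (acc : List (List Char)),
      PySem.Chars.split₀.go (r ++ t) cur acc = PySem.Chars.split₀.go t (r.reverse ++ cur) acc := by
  induction r with
  | nil => intro t cur acc; simp
  | cons c r ih =>
    intro t cur acc
    have hc := hr c (by simp)
    simp only [List.cons_append, PySem.Chars.split₀.go, hc, Bool.false_eq_true, if_false]
    rw [ih (fun x hx => hr x (by simp [hx])) t (c :: cur) acc]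
    simp

theorem split₀_space_cons (l : List Char) :
    PySem.Chars.split₀ (' ' :: l) = PySem.Chars.split₀ l := by
  simp [PySem.Chars.split₀, PySem.Chars.split₀.go,
    show PySem.Chars.isspace ' ' = true from by decide]

theorem split₀_run_space (r t : List Char) (hne : r ≠ [])
    (hr : ∀ x ∈ r, PySem.Chars.isspace x = false) :
    PySem.Chars.split₀ (r ++ ' ' :: t) = r :: PySem.Chars.split₀ t := by
  unfold PySem.Chars.split₀
  rw [splitgo_nonspace r hr (' ' :: t) [] []]
  simp only [List.append_nil]
  have h2 : (r.reverse).isEmpty = false := by simp [hne]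
  simp only [PySem.Chars.split₀.go, show PySem.Chars.isspace ' ' = true from by decide,
    h2, if_true, Bool.false_eq_true, if_false]
  rw [splitgo_acc]
  simp

theorem split₀_run (r : List Char) (hne : r ≠ [])
    (hr : ∀ x ∈ r, PySem.Chars.isspace x = false) :
    PySem.Chars.split₀ r = [r] := by
  unfold PySem.Chars.split₀
  have h := splitgo_nonspace r hr [] [] []
  simp only [List.append_nil] at h
  rw [h]
  have h2 : (r.reverse).isEmpty = false := by simp [hne]
  simp [PySem.Chars.split₀.go, h2]

-- B's sum, with an explicit starting accumulator
theorem bsum_start (ts : List (List Char)) :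
    ∀ (a : Int), ts.foldl (fun acc tok => acc + (PySem.Int.ofChars? tok).getD 0) a
      = a + ts.foldl (fun acc tok => acc + (PySem.Int.ofChars? tok).getD 0) 0 := by
  induction ts with
  | nil => intro a; simp
  | cons x ts ih =>
    intro a
    simp only [List.foldl_cons]
    rw [ih (a + _), ih (0 + _)]
    ring

-- the head of dropWhile fails the predicate
theorem dropWhile_head_false {p : Char → Bool} {l : List Char} {d : Char} {t : List Char}
    (h : l.dropWhile p = d :: t) : p d = false := by
  have := List.head?_dropWhile_not p l
  rw [h] at this; simpa using this

-- the main invariant: A's flushed fold equals a plus B's sum over the masked input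
theorem main_inv : ∀ (n : Nat) (cs : List Char), cs.length = n → ∀ (a : Int),
    (List.foldl solStep (a, ['0']) cs).1
      + (PySem.Int.ofChars? (List.foldl solStep (a, ['0']) cs).2).getD 0
    = a + (PySem.Chars.split₀ (cs.map (fun c => if PySem.Chars.isdigit c = true then c else ' '))).foldl
        (fun acc tok => acc + (PySem.Int.ofChars? tok).getD 0) 0 := by
  intro n
  induction n using Nat.strong_induction_on with
  | _ n ih =>
    intro cs hlen a
    match cs with
    | [] => simp [PySem.Chars.split₀, PySem.Chars.split₀.go, ofChars_zero]
    | c :: cs' =>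
      by_cases hc : PySem.Chars.isdigit c = true
      · -- digit head: consume the maximal digit run c :: r
        have hsplit := List.takeWhile_append_dropWhile
          (p := fun x => PySem.Chars.isdigit x) (l := cs')
        set r := cs'.takeWhile (fun x => PySem.Chars.isdigit x) with hr
        set rest := cs'.dropWhile (fun x => PySem.Chars.isdigit x) with hrest
        have hrd : ∀ x ∈ r, PySem.Chars.isdigit x = true := fun x hx =>
          List.mem_takeWhile_imp hx
        have hcrd : ∀ x ∈ (c :: r), PySem.Chars.isdigit x = true := by
          intro x hx; rcases hx with _|⟨_,hx⟩
          · exact hc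
          · exact hrd _ hx
        have hns : ∀ x ∈ (c :: r), PySem.Chars.isspace x = false := fun x hx =>
          digit_not_space x (hcrd x hx)
        have hmaskid : (c :: r).map (fun x => if PySem.Chars.isdigit x = true then x else ' ')
            = c :: r := by
          rw [List.map_congr_left (g := id) (fun x hx => by simp [hcrd x hx]), List.map_id]
        have hfold : List.foldl solStep (a, ['0']) (c :: cs')
            = List.foldl solStep (a, '0' :: c :: r) rest := by
          simp only [List.foldl_cons, solStep, hc, if_pos]
          rw [← hsplit, foldl_digit_run r hrd rest a _]
          simp
        have hmask : (c :: cs').map (fun x => if PySem.Chars.isdigit x = true then x else ' ')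
            = (c :: r) ++ rest.map (fun x => if PySem.Chars.isdigit x = true then x else ' ') := by
          conv_lhs => rw [show c :: cs' = (c :: r) ++ rest by rw [← hsplit]; simp]
          rw [List.map_append, hmaskid]
        match hrest2 : rest with
        | [] =>
          rw [hfold]
          simp only [List.foldl_nil]
          rw [ofChars_cons_zero c r hc hrd, hmask]
          simp only [List.map_nil, List.append_nil]
          rw [split₀_run (c :: r) (by simp) hns]
          simp
        | d :: rest' =>
          have hd : PySem.Chars.isdigit d = false := by
            exact dropWhile_head_false hrest.symm
          have hlen' : rest'.length < n := by
            have : cs'.length = r.length + (d :: rest').length := by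
              rw [← hsplit]; simp
            simp only [List.length_cons] at this hlen
            omega
          rw [hfold]
          simp only [List.foldl_cons, solStep, hd, Bool.false_eq_true, if_false]
          rw [ofChars_cons_zero c r hc hrd]
          rw [ih rest'.length hlen' rest' rfl _]
          rw [hmask]
          simp only [List.map_cons, hd, Bool.false_eq_true, if_false]
          rw [split₀_run_space (c :: r) _ (by simp) hns]
          simp only [List.foldl_cons]
          rw [bsum_start _ (0 + _)]
          ring
      · -- non-digit head: flushes int("0") = 0 and contributes a space
        have hlen' : cs'.length < n := by simp at hlen; omega
        simp only [List.foldl_cons, solStep, hc, Bool.false_eq_true, if_false,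
          ofChars_zero, add_zero]
        rw [ih cs'.length hlen' cs' rfl a]
        simp only [List.map_cons, hc, Bool.false_eq_true, if_false]
        rw [split₀_space_cons]

-- ===== VERDICT (by name: the statement is the Claim_ definition above) =====
theorem solution_spec : Claim_equal_solution := by
  intro s _
  unfold Spec_solution solution solution_alt
  simpa using main_inv s.toList.length s.toList rfl 0
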